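-- pv_equiv track=rewrite | github.com/joshanashakya/dissertation | workspace/dataset/java-python/GeeksForGeeks/2380/A/2.py | countMultiples
-- ===== SOURCE A (Python) =====
-- def countMultiples( n):
--
--     # As we have to check divisibility
--     # by three numbers, So we can implement
--     # bit masking
--     multiple = [ 2, 3, 5 ]
--
--     count = 0
--     mask = int(pow(2, 3))
--     for i in range(1,mask):
--         # we check whether jth bit
--         # is set or not, if jth bit
--         # is set, simply multiply
--         # to prod
--         prod = 1
--         for j in range(3):
--
--             # check for set bit
--             if (i & (1 << j)):
--                 prod = prod * multiple[j]
--
--         # check multiple of product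
--         if (bin(i).count('1') % 2 == 1):
--             count = count + n // prod
--         else:
--             count = count - n // prod
--
--     return count
-- ===== SOURCE B (Python) =====
-- def countMultiples(n):
--     # Periodicity: every block of 30 consecutive integers contains exactly 22
--     # integers divisible by 2, 3 or 5. Count whole blocks, then scan the
--     # remainder 0..n%30 directly by divisibility tests.
--     q, r = divmod(n, 30)
--     partial = 0
--     for k in range(1, r + 1):
--         if k % 2 == 0 or k % 3 == 0 or k % 5 == 0:
--             partial += 1
--     return 22 * q + partial
-- ===== Notes on version B (the rewrite author's own statement) =====
-- stated objective: alternative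
-- what changed: Replaced the bitmask subset loop with its inclusion-exclusion sum of floor divisions by period-30 block counting: divmod(n, 30), 22 hits per full block of 30, plus a direct divisibility scan (k%2/k%3/k%5 tests) over the remainder 0..n%30 -- no divisor products or signed terms at all.
import Mathlib
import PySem

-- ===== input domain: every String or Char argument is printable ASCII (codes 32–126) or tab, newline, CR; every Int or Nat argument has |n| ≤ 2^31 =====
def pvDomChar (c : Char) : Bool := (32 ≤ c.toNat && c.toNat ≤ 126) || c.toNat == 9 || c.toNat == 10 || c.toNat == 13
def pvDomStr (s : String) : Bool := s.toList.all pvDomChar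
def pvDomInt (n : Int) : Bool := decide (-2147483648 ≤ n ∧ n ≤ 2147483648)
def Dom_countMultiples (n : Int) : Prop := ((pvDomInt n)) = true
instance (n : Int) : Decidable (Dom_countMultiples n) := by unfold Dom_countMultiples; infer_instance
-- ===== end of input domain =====

-- B replaces A's bitmask inclusion-exclusion loop by period-30 block counting:
-- 22 hits per block of 30, plus a direct divisibility scan of the remainder (objective: alternative).


-- ===== PORT A =====
-- literal transliteration: range(1, 2**3) over bitmasks, inner range(3) bit tests
-- (1 << j is '1 <<< j.toNat'; j ∈ {0,1,2} so toNat is exact), parity via bin(i).count('1') % 2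
def countMultiples (n : Int) : Int :=
  let multiple : List Int := [2, 3, 5]
  (PySem.List.pyRange 1 8 1).foldl (fun count i =>
    let prod := (PySem.List.pyRange 0 3 1).foldl (fun prod j =>
      if PySem.Int.band i (1 <<< j.toNat) ≠ 0 then
        prod * PySem.List.pyGetD multiple j 0
      else prod) 1
    if PySem.Int.mod (PySem.Str.count (PySem.Int.pyBin i) "1" : Int) 2 == 1 then
      count + PySem.Int.floordiv n prod
    else
      count - PySem.Int.floordiv n prod) 0

-- ===== PORT B =====
-- transliteration of Source B: q, r = divmod(n, 30); scan 1..r for divisibility; 22*q + partial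
def countMultiples_alt (n : Int) : Int :=
  let q := PySem.Int.floordiv n 30
  let r := PySem.Int.mod n 30
  let partial_ := (PySem.List.pyRange 1 (r + 1) 1).foldl (fun partial_ k =>
    if PySem.Int.mod k 2 == 0 || PySem.Int.mod k 3 == 0 || PySem.Int.mod k 5 == 0 then
      partial_ + 1
    else partial_) 0
  22 * q + partial_

-- ===== PRECONDITION & SPEC =====
def Spec_countMultiples (n : Int) (out : Int) : Prop := out = countMultiples_alt n
instance (n : Int) (out : Int) : Decidable (Spec_countMultiples n out) := by unfold Spec_countMultiples; infer_instance

-- ===== CLAIM (what is proved, stated in full; the proofs are below) =====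
def Claim_equal_countMultiples : Prop := ∀ (n : Int), Dom_countMultiples n → Spec_countMultiples n (countMultiples n)

-- ===== LEMMAS AND PROOFS =====
-- A's 7-iteration foldl reduces definitionally to its term-by-term sum (masks 1..7 in order).
lemma countMultiples_eval (n : Int) : countMultiples n =
    0 + PySem.Int.floordiv n 2 + PySem.Int.floordiv n 3 - PySem.Int.floordiv n 6
      + PySem.Int.floordiv n 5 - PySem.Int.floordiv n 10 - PySem.Int.floordiv n 15
      + PySem.Int.floordiv n 30 := rfl

-- B's remainder scan agrees with the inclusion-exclusion sum on each residue 0..29.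
lemma partial_eval (r : Int) (h0 : 0 ≤ r) (h30 : r < 30) :
    (PySem.List.pyRange 1 (r + 1) 1).foldl (fun partial_ k =>
      if PySem.Int.mod k 2 == 0 || PySem.Int.mod k 3 == 0 || PySem.Int.mod k 5 == 0 then
        partial_ + 1
      else partial_) 0
    = r / 2 + r / 3 + r / 5 - r / 6 - r / 10 - r / 15 + r / 30 := by
  interval_cases r <;> decide

-- ===== VERDICT (by name: the statement is the Claim_ definition above) =====
theorem countMultiples_spec : Claim_equal_countMultiples := by
  intro n _
  unfold Spec_countMultiples countMultiples_alt
  rw [countMultiples_eval]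
  simp only [PySem.Int.mod_eq_emod_of_pos (by norm_num : (0:Int) < 30)]
  rw [partial_eval (n % 30) (Int.emod_nonneg n (by norm_num)) (Int.emod_lt_of_pos n (by norm_num))]
  simp only [PySem.Int.floordiv_eq_ediv_of_pos (show (0:Int) < 2 by norm_num),
             PySem.Int.floordiv_eq_ediv_of_pos (show (0:Int) < 3 by norm_num),
             PySem.Int.floordiv_eq_ediv_of_pos (show (0:Int) < 5 by norm_num),
             PySem.Int.floordiv_eq_ediv_of_pos (show (0:Int) < 6 by norm_num),
             PySem.Int.floordiv_eq_ediv_of_pos (show (0:Int) < 10 by norm_num),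
             PySem.Int.floordiv_eq_ediv_of_pos (show (0:Int) < 15 by norm_num),
             PySem.Int.floordiv_eq_ediv_of_pos (show (0:Int) < 30 by norm_num)]
  omega
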